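-- pv_equiv track=rewrite | github.com/Hendyley/NTU_Comp_Science | SC4023-CE4123-CZ4123-BIG DATA MANAGEMENT/Project/SC4023-Project-main/ZoneMap.py | split_data_into_zones
-- ===== SOURCE A (Python) =====
-- def split_data_into_zones(data):
--     zones = {}
--
--     prev_end_index = None
--     for line in data.split('\n'):
--         if line[:4].isdigit():  # Check if the first 4 characters are numerical
--             index = line.split('-')[0]
--             if prev_end_index is None:
--                 current_zone_start = 1
--             else:
--                 current_zone_start = prev_end_index + 1
--
--             key = line[:4]
--             if key not in zones:
--                 zones[key] = {'start': current_zone_start, 'end': None}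
--             zones[key]['end'] = current_zone_start  # Update the end index of the current zone
--             prev_end_index = current_zone_start  # Update the end index for the next iteration
--
--     return zones
-- ===== SOURCE B (Python) =====
-- def split_data_into_zones(data):
--     # Staged passes: extract the digit-prefixed keys, build per-key position lists, then reduce each list to its first and last entry.
--     keys = [line[:4] for line in data.split('\n') if line[:4].isdigit()]
--     positions = {}
--     for i, k in enumerate(keys, 1):
--         positions.setdefault(k, []).append(i)
--     return {k: {'start': v[0], 'end': v[-1]} for k, v in positions.items()}
-- ===== Notes on version B (the rewrite author's own statement) =====
-- stated objective: alternative
-- what changed: Replaces A's single stateful loop (a dict updated in place plus a previous-end counter and a dead split computation) by three staged passes: extract the digit-prefixed four-character keys, group the 1-based positions of each key into lists, then reduce each list to its first and last position with a dict comprehension.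
import Mathlib
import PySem

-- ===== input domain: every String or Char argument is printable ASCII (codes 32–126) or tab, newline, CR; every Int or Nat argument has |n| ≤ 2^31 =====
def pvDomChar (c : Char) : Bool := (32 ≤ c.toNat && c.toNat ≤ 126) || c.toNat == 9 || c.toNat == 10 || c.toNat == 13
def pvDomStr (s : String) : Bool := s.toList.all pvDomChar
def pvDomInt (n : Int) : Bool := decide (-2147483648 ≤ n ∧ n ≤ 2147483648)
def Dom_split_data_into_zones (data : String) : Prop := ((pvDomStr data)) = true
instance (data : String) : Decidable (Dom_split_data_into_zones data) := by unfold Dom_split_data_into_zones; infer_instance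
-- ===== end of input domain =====

-- B restructures A's single stateful loop into staged passes (keys, per-key position lists, reduce); same O(n) cost; return values proved equal on all inputs.

-- ===== PORT A =====
-- A-side helpers: line[:4]
def pvTake4 (line : String) : String := PySem.Str.slice line none (some 4)

-- the body of A's for-loop; state = (zones, prev_end_index)
def pvAStep (st : PySem.Dict String (PySem.Dict String (Option Int)) × Option Int) (line : String) :
    PySem.Dict String (PySem.Dict String (Option Int)) × Option Int :=
  if PySem.Str.strIsdigit (pvTake4 line) then
    -- index = line.split('-')[0]  (dead in A; sep ≠ "" so split? is some, [0] never raises)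
    let _index := PySem.List.pyGet? ((PySem.Str.split? line "-").getD []) 0
    let cs : Int := match st.2 with
      | none => 1
      | some p => p + 1
    let key := pvTake4 line
    let zones := if st.1.contains key then st.1
      else st.1.insert key (PySem.Dict.ofList [("start", some cs), ("end", (none : Option Int))])
    -- zones[key]['end'] = cs : key is always present here, so the modify default is never used
    let zones := zones.modify key PySem.Dict.empty (fun d => d.insert "end" (some cs))
    (zones, some cs)
  else st

def split_data_into_zones (data : String) : List (String × List (String × Option Int)) :=
  -- data.split('\n'): sep ≠ "" so split? is some
  ((((PySem.Str.split? data "\n").getD []).foldl pvAStep (PySem.Dict.empty, none))).1.items.map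
    (fun kv => (kv.1, kv.2.items))

-- ===== PORT B =====
-- B-side helpers: the keys comprehension  [line[:4] for line in lines if line[:4].isdigit()]
def pvKeys (lines : List String) : List String :=
  (lines.filter (fun line => PySem.Str.strIsdigit (pvTake4 line))).map pvTake4

-- the body of B's grouping loop: positions.setdefault(k, []).append(i) for p = (i, k)
def pvBStep (d : PySem.Dict String (List Int)) (p : Int × String) : PySem.Dict String (List Int) :=
  d.modify p.2 [] (fun v => v ++ [p.1])

def split_data_into_zones_alt (data : String) : List (String × List (String × Option Int)) :=
  -- keys = [line[:4] for line in data.split('\n') if line[:4].isdigit()]  (sep ≠ "" so split? is some)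
  -- positions = the grouping loop over enumerate(keys, 1); then the reducing dict comprehension
  (((PySem.List.enumerate (pvKeys ((PySem.Str.split? data "\n").getD [])) 1).foldl
      pvBStep PySem.Dict.empty)).items.map (fun kv =>
    (kv.1, [("start", PySem.List.pyGet? kv.2 0), ("end", PySem.List.pyGet? kv.2 (-1))]))

-- ===== PRECONDITION & SPEC =====
def Spec_split_data_into_zones (data : String) (out : List (String × List (String × Option Int))) : Prop := out = split_data_into_zones_alt data
instance (data : String) (out : List (String × List (String × Option Int))) : Decidable (Spec_split_data_into_zones data out) := by unfold Spec_split_data_into_zones; infer_instance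

-- ===== CLAIM (what is proved, stated in full; the proofs are below) =====
def Claim_equal_split_data_into_zones : Prop := ∀ (data : String), Dom_split_data_into_zones data → Spec_split_data_into_zones data (split_data_into_zones data)

-- ===== LEMMAS AND PROOFS =====

-- proof-only: A's loop body re-expressed over an enumerated (position, key) pair
def pvAZStep (z : PySem.Dict String (PySem.Dict String (Option Int))) (p : Int × String) :
    PySem.Dict String (PySem.Dict String (Option Int)) :=
  let z1 := if z.contains p.2 then z
    else z.insert p.2 (PySem.Dict.ofList [("start", some p.1), ("end", (none : Option Int))])
  z1.modify p.2 PySem.Dict.empty (fun d => d.insert "end" (some p.1))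

-- prev_end_index after c digit lines
def pvPrev (c : Nat) : Option Int := if c = 0 then none else some (c : Int)

theorem pvEnum_cons {A : Type} (x : A) (xs : List A) (c : Int) :
    PySem.List.enumerate (x :: xs) c = (c, x) :: PySem.List.enumerate xs (c + 1) := rfl

-- A's fold over the raw lines equals the abstract fold over the enumerated keys
theorem pvA_fold_eq (lines : List String) (z : PySem.Dict String (PySem.Dict String (Option Int))) (c : Nat) :
    lines.foldl pvAStep (z, pvPrev c) =
      ((PySem.List.enumerate (pvKeys lines) ((c : Int) + 1)).foldl pvAZStep z,
        pvPrev (c + (pvKeys lines).length)) := by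
  induction lines generalizing z c with
  | nil => simp [pvKeys]
  | cons l ls ih =>
    by_cases hd : PySem.Str.strIsdigit (pvTake4 l) = true
    all_goals have hd2 := hd
    all_goals simp only [PySem.Str.strIsdigit_eq] at hd2
    · have hstep : pvAStep (z, pvPrev c) l = (pvAZStep z (((c : Int) + 1), pvTake4 l), pvPrev (c + 1)) := by
        simp only [pvAStep, pvAZStep, hd, if_true, pvPrev]
        rcases Nat.eq_zero_or_pos c with h0 | h0
        · subst h0; simp
        · have hne : c ≠ 0 := by omega
          simp [hne]
      have hk : pvKeys (l :: ls) = pvTake4 l :: pvKeys ls := by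
        simp [pvKeys, hd2]
      rw [List.foldl_cons, hstep, ih, hk, pvEnum_cons, List.foldl_cons]
      have hc : ((c : Int) + 1) = ((c + 1 : Nat) : Int) := by push_cast; ring
      rw [hc]
      have hlen : (c + 1) + (pvKeys ls).length = c + (pvTake4 l :: pvKeys ls).length := by
        simp; omega
      rw [hlen]
    · have hstep : pvAStep (z, pvPrev c) l = (z, pvPrev c) := by
        unfold pvAStep
        rw [if_neg hd]
      have hk : pvKeys (l :: ls) = pvKeys ls := by
        simp [pvKeys, hd2]
      rw [List.foldl_cons, hstep, ih, hk]

-- positions list per key (B's grouping loop)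
theorem pvB_getD (es : List (Int × String)) (d : PySem.Dict String (List Int)) (k : String) :
    (es.foldl pvBStep d).getD k [] = d.getD k [] ++ (es.filter (fun p => p.2 == k)).map (fun p => p.1) := by
  have h := PySem.Dict.getD_foldl_modify_append (es.map (fun p => (p.2, p.1))) d k
  rw [List.foldl_map] at h
  simpa [pvBStep, List.filter_map, Function.comp, List.map_map] using h

-- one A-step over a pair, seen on keys: the Set.add of the pair's key
theorem pvAZStep_keys (z : PySem.Dict String (PySem.Dict String (Option Int))) (p : Int × String) :
    (pvAZStep z p).keys = PySem.Set.add z.keys p.2 := by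
  unfold pvAZStep PySem.Set.add
  by_cases hc : z.contains p.2 = true
  · have hm : PySem.Set.contains z.keys p.2 = true := by
      have := (PySem.Dict.contains_iff_mem_keys z p.2).mp hc
      simp [PySem.Set.contains, this]
    rw [if_pos hc, PySem.Dict.keys_modify, PySem.Dict.keys_insert_of_contains _ _ hc, if_pos hm]
  · have hcf : z.contains p.2 = false := by simpa using hc
    have hmem : p.2 ∉ z.keys := by
      intro hmem
      have := (PySem.Dict.contains_iff_mem_keys z p.2).mpr hmem
      rw [hcf] at this
      exact Bool.false_ne_true this
    have hm : ¬ PySem.Set.contains z.keys p.2 = true := by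
      simp [PySem.Set.contains, hmem]
    rw [if_neg hc, PySem.Dict.keys_modify]
    have hc1 : (z.insert p.2 (PySem.Dict.ofList [("start", some p.1), ("end", (none : Option Int))])).contains p.2 = true := by
      simp
    rw [PySem.Dict.keys_insert_of_contains _ _ hc1, PySem.Dict.keys_insert_of_not_contains _ _ hcf, if_neg hm]

-- keys of A's abstract fold
theorem pvA_keys (es : List (Int × String)) (z : PySem.Dict String (PySem.Dict String (Option Int))) :
    (es.foldl pvAZStep z).keys = PySem.Set.update z.keys (es.map (fun p => p.2)) := by
  induction es generalizing z with
  | nil => simp [PySem.Set.update]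
  | cons p es ih =>
    rw [List.foldl_cons, ih, List.map_cons]
    show _ = List.foldl PySem.Set.add (PySem.Set.add z.keys p.2) (es.map (fun p => p.2))
    rw [pvAZStep_keys]
    rfl

theorem pvA_nodup (es : List (Int × String)) (z : PySem.Dict String (PySem.Dict String (Option Int)))
    (h : z.keys.Nodup) : (es.foldl pvAZStep z).keys.Nodup := by
  induction es generalizing z with
  | nil => exact h
  | cons p es ih =>
    rw [List.foldl_cons]
    apply ih
    rw [pvAZStep_keys]
    unfold PySem.Set.add
    split
    · exact h
    · next hm =>
      have hmem : p.2 ∉ z.keys := by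
        intro hmem
        exact hm (by simp [PySem.Set.contains, hmem])
      simp [List.nodup_append, h]
      intro a ha h2
      exact hmem (h2 ▸ ha)

-- A-step facts at an untouched key
theorem pvAZStep_getD_of_ne (z : PySem.Dict String (PySem.Dict String (Option Int))) (p : Int × String)
    (k : String) (hne : k ≠ p.2) :
    (pvAZStep z p).getD k PySem.Dict.empty = z.getD k PySem.Dict.empty := by
  unfold pvAZStep
  rw [PySem.Dict.getD_modify_of_ne _ _ _ hne]
  split
  · rfl
  · exact PySem.Dict.getD_insert_of_ne _ _ _ hne

theorem pvAZStep_contains (z : PySem.Dict String (PySem.Dict String (Option Int))) (p : Int × String)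
    (k : String) :
    (pvAZStep z p).contains k = (k == p.2 || z.contains k) := by
  unfold pvAZStep
  rw [PySem.Dict.contains_modify]
  split
  · rfl
  · rw [PySem.Dict.contains_insert]
    by_cases h : k = p.2 <;> simp [h]

-- per-key value of A's abstract fold, key already present
theorem pvA_getD_contains (es : List (Int × String)) (z : PySem.Dict String (PySem.Dict String (Option Int)))
    (k : String) (hc : z.contains k = true) :
    (es.foldl pvAZStep z).getD k PySem.Dict.empty =
      match ((es.filter (fun p => p.2 == k)).map (fun p => p.1)).getLast? with
      | none => z.getD k PySem.Dict.empty
      | some e => (z.getD k PySem.Dict.empty).insert "end" (some e) := by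
  induction es generalizing z with
  | nil => simp
  | cons p es ih =>
    rw [List.foldl_cons]
    by_cases hpk : p.2 = k
    · have hstep : (pvAZStep z p).getD k PySem.Dict.empty = (z.getD k PySem.Dict.empty).insert "end" (some p.1) := by
        unfold pvAZStep
        rw [hpk, if_pos hc]
        exact PySem.Dict.getD_modify_self _ _ _ _
      have hc' : (pvAZStep z p).contains k = true := by
        rw [pvAZStep_contains]; simp [hpk]
      rw [ih _ hc', hstep]
      rw [List.filter_cons_of_pos (by simp [hpk]), List.map_cons, List.getLast?_cons]
      cases hL : ((es.filter (fun p => p.2 == k)).map (fun p => p.1)).getLast? with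
      | none => simp
      | some e => simp [PySem.Dict.insert_insert_self]
    · have hpk' : ¬ k = p.2 := fun h => hpk h.symm
      have hc' : (pvAZStep z p).contains k = true := by
        rw [pvAZStep_contains]; simp [hc]
      rw [ih _ hc', pvAZStep_getD_of_ne _ _ _ hpk',
        List.filter_cons_of_neg (by simp [hpk])]

-- per-key value of A's abstract fold, fresh key with at least one occurrence
theorem pvA_getD_fresh (es : List (Int × String)) (z : PySem.Dict String (PySem.Dict String (Option Int)))
    (k : String) (hc : z.contains k = false)
    (s e : Int) (hh : ((es.filter (fun p => p.2 == k)).map (fun p => p.1)).head? = some s)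
    (hl : ((es.filter (fun p => p.2 == k)).map (fun p => p.1)).getLast? = some e) :
    (es.foldl pvAZStep z).getD k PySem.Dict.empty =
      PySem.Dict.ofList [("start", some s), ("end", some e)] := by
  induction es generalizing z with
  | nil => simp at hh
  | cons p es ih =>
    rw [List.foldl_cons]
    by_cases hpk : p.2 = k
    · rw [List.filter_cons_of_pos (by simp [hpk]), List.map_cons] at hh hl
      rw [List.head?_cons] at hh
      obtain rfl : s = p.1 := (Option.some.inj hh).symm
      have hstep : (pvAZStep z p).getD k PySem.Dict.empty =
          PySem.Dict.ofList [("start", some p.1), ("end", some p.1)] := by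
        unfold pvAZStep
        rw [hpk, if_neg (by simp [hc]), PySem.Dict.getD_modify_self,
          PySem.Dict.getD_insert_self]
        rfl
      have hc' : (pvAZStep z p).contains k = true := by
        rw [pvAZStep_contains]; simp [hpk]
      rw [pvA_getD_contains es _ k hc', hstep]
      rw [List.getLast?_cons] at hl
      cases hL : ((es.filter (fun p => p.2 == k)).map (fun p => p.1)).getLast? with
      | none =>
        rw [hL] at hl
        simp at hl
        subst hl
        rfl
      | some e' =>
        rw [hL] at hl
        simp at hl
        subst hl
        rfl
    · have hpk' : ¬ k = p.2 := fun h => hpk h.symm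
      have hc' : (pvAZStep z p).contains k = false := by
        rw [pvAZStep_contains]
        simp [hpk', hc]
      rw [List.filter_cons_of_neg (by simp [hpk])] at hh hl
      exact ih _ hc' hh hl

-- B's positions dict: keys and nodup, via the library grouping-loop lemmas
theorem pvB_keys (es : List (Int × String)) (d : PySem.Dict String (List Int)) :
    (es.foldl pvBStep d).keys = PySem.Set.update d.keys (es.map (fun p => p.2)) :=
  PySem.Dict.keys_foldl_modify_key es (fun p => p.2) [] (fun _ p v => v ++ [p.1]) d

theorem pvB_nodup (es : List (Int × String)) :
    (es.foldl pvBStep PySem.Dict.empty).keys.Nodup :=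
  PySem.Dict.nodup_keys_foldl_modify_key es (fun p => p.2) [] (fun _ p v => v ++ [p.1]) PySem.Dict.empty
    PySem.Dict.nodup_keys_empty

-- ===== VERDICT (by name: the statement is the Claim_ definition above) =====
theorem split_data_into_zones_spec : Claim_equal_split_data_into_zones := by
  intro data _
  unfold Spec_split_data_into_zones split_data_into_zones split_data_into_zones_alt
  generalize (PySem.Str.split? data "\n").getD [] = lines
  have hA1 : (lines.foldl pvAStep (PySem.Dict.empty, none)).1
      = (PySem.List.enumerate (pvKeys lines) 1).foldl pvAZStep PySem.Dict.empty := by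
    have h := pvA_fold_eq lines PySem.Dict.empty 0
    have h0 : pvPrev 0 = none := rfl
    rw [h0] at h
    rw [h]
    norm_num
  rw [hA1]
  have hAnd : ((PySem.List.enumerate (pvKeys lines) 1).foldl pvAZStep PySem.Dict.empty).keys.Nodup :=
    pvA_nodup _ _ (by rw [PySem.Dict.keys_empty]; exact List.nodup_nil)
  have hBnd : ((PySem.List.enumerate (pvKeys lines) 1).foldl pvBStep PySem.Dict.empty).keys.Nodup :=
    pvB_nodup _
  have hK : ((PySem.List.enumerate (pvKeys lines) 1).foldl pvAZStep PySem.Dict.empty).keys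
      = ((PySem.List.enumerate (pvKeys lines) 1).foldl pvBStep PySem.Dict.empty).keys := by
    rw [pvA_keys, pvB_keys, PySem.Dict.keys_empty, PySem.Dict.keys_empty]
  rw [PySem.Dict.items_eq_map_keys _ hAnd PySem.Dict.empty,
      PySem.Dict.items_eq_map_keys _ hBnd [], hK, List.map_map, List.map_map]
  apply List.map_congr_left
  intro k hk
  simp only [Function.comp]
  -- k occurs among the enumerated keys
  have hkmem : k ∈ (PySem.List.enumerate (pvKeys lines) 1).map (fun p => p.2) := by
    rw [pvB_keys, PySem.Dict.keys_empty] at hk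
    exact (PySem.Set.mem_ofList _ _).mp hk
  have hne : ((PySem.List.enumerate (pvKeys lines) 1).filter (fun p => p.2 == k)).map (fun p => p.1) ≠ [] := by
    rcases List.mem_map.mp hkmem with ⟨p, hp, hpk⟩
    intro h
    have hpf : p ∈ (PySem.List.enumerate (pvKeys lines) 1).filter (fun p => p.2 == k) :=
      List.mem_filter.mpr ⟨hp, by simp [hpk]⟩
    rw [List.map_eq_nil_iff.mp h] at hpf
    simp at hpf
  obtain ⟨s, hh⟩ : ∃ s, (((PySem.List.enumerate (pvKeys lines) 1).filter (fun p => p.2 == k)).map (fun p => p.1)).head? = some s := by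
    cases h : (((PySem.List.enumerate (pvKeys lines) 1).filter (fun p => p.2 == k)).map (fun p => p.1)).head? with
    | none => exact absurd (List.head?_eq_none_iff.mp h) hne
    | some s => exact ⟨s, rfl⟩
  obtain ⟨e, hl⟩ : ∃ e, (((PySem.List.enumerate (pvKeys lines) 1).filter (fun p => p.2 == k)).map (fun p => p.1)).getLast? = some e := by
    cases h : (((PySem.List.enumerate (pvKeys lines) 1).filter (fun p => p.2 == k)).map (fun p => p.1)).getLast? with
    | none => exact absurd (List.getLast?_eq_none_iff.mp h) hne
    | some e => exact ⟨e, rfl⟩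
  have hAval := pvA_getD_fresh (PySem.List.enumerate (pvKeys lines) 1) PySem.Dict.empty k
    (PySem.Dict.contains_empty k) s e hh hl
  have hBval : ((PySem.List.enumerate (pvKeys lines) 1).foldl pvBStep PySem.Dict.empty).getD k []
      = ((PySem.List.enumerate (pvKeys lines) 1).filter (fun p => p.2 == k)).map (fun p => p.1) := by
    rw [pvB_getD, PySem.Dict.getD_empty]
    rfl
  rw [hAval, hBval, PySem.List.pyGet?_zero, ← List.head?_eq_getElem?, hh, PySem.List.pyGet?_neg_one, hl]
  rfl
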